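-- pv_equiv track=rewrite | github.com/MashaMMasha/AInterior | obllomov/agents/selectors/objects.py | _sort_by_type
-- ===== SOURCE A (Python) =====
-- def _sort_by_type(
--     objects: list[tuple[str, str]]
-- ) -> list[tuple[str, str]]:
--     type2objects: dict[str, list] = {}
--     for name, asset_id in objects:
--         obj_type = name.split("-")[0]
--         type2objects.setdefault(obj_type, []).append((name, asset_id))
--     result = []
--     for obj_type in type2objects:
--         result += sorted(type2objects[obj_type])
--     return result
-- ===== SOURCE B (Python) =====
-- def _sort_by_type(
--     objects: list[tuple[str, str]]
-- ) -> list[tuple[str, str]]: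
--     # Rank each type prefix by first appearance, then do ONE global sort
--     # keyed by (type rank, tuple) instead of per-type grouping + sorts.
--     order: dict[str, int] = {}
--     for name, _ in objects:
--         t = name.split("-")[0]
--         if t not in order:
--             order[t] = len(order)
--     return sorted(objects, key=lambda o: (order[o[0].split("-")[0]], o))
-- ===== Notes on version B (the rewrite author's own statement) =====
-- stated objective: simpler
-- what changed: Replaces A's group-into-dict-of-lists plus one sort per group and concatenation by a first-appearance rank table for the type prefix and ONE global sort keyed by (rank, tuple).
import Mathlib
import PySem

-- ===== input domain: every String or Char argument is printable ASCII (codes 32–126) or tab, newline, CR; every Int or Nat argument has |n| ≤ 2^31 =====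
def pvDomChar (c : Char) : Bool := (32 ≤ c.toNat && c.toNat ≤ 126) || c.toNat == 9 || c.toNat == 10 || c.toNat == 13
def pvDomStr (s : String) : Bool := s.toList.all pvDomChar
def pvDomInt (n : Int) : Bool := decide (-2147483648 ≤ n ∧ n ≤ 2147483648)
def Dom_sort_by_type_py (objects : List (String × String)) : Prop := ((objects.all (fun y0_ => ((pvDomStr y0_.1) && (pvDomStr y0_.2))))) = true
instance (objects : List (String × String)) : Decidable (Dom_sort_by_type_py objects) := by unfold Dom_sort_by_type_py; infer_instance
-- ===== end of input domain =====

-- B replaces A's group-into-dict-then-sort-each-group-and-concatenate by ONE global sort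
-- keyed by (first-appearance rank of the type prefix, tuple); objective: simpler/alternative.

-- name.split("-")[0]; split? with a non-empty separator is always some non-empty list,
-- so getD/headD never take their defaults (exact)
def pvPrefix (s : String) : String := ((PySem.Str.split? s "-").getD []).headD ""

-- ===== PORT A =====
-- first loop of A: type2objects, built with setdefault(t, []).append(p), i.e. d[t] = d.get(t, []) + [p]
def pvTypeDict (objects : List (String × String)) : PySem.Dict String (List (String × String)) :=
  objects.foldl (fun d p => d.modify (pvPrefix p.1) [] (fun l => l ++ [p])) PySem.Dict.empty

-- second loop: for obj_type in type2objects: result += sorted(type2objects[obj_type]).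
-- Python's sorted on tuples compares lexicographically: PySem.List.sorted2 with the two
-- tuple components as keys (exact; Lean's Prod '<' would be pointwise, not lexicographic).
def sort_by_type_py (objects : List (String × String)) : List (String × String) :=
  (pvTypeDict objects).keys.foldl
    (fun result t => result ++ PySem.List.sorted2 ((pvTypeDict objects).getD t []) Prod.fst Prod.snd) []

-- ===== PORT B =====
-- B's first loop: order[t] = len(order) on first sight of t
def pvOrder (objects : List (String × String)) : PySem.Dict String Int :=
  objects.foldl (fun d p =>
    if d.contains (pvPrefix p.1) then d else d.insert (pvPrefix p.1) (d.size : Int)) PySem.Dict.empty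

-- strict lexicographic comparison of Python's 3-component key tuple (rank, name, asset_id);
-- PySem.List.sorted/sorted2 cover 1- and 2-component keys, so the 3-component tuple
-- comparison is spelled out by hand (exact: Python compares tuples lexicographically)
def pvLt3 (a b : Int × (String × String)) : Bool :=
  decide (a.1 < b.1) ||
    (!decide (b.1 < a.1) &&
      (decide (a.2.1 < b.2.1) || (!decide (b.2.1 < a.2.1) && decide (a.2.2 < b.2.2))))

-- B's single sort with key (order[prefix], o): the same stable insertion sort that
-- PySem.List.sorted performs, with the hand-written tuple comparator above (exact)
def sort_by_type_py_alt (objects : List (String × String)) : List (String × String) :=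
  objects.foldl (fun acc x =>
    PySem.List.insertBy (fun a b =>
      pvLt3 ((pvOrder objects).getD (pvPrefix a.1) 0, a)
            ((pvOrder objects).getD (pvPrefix b.1) 0, b)) x acc) []

-- ===== PRECONDITION & SPEC =====
def Spec_sort_by_type_py (objects : List (String × String)) (out : List (String × String)) : Prop := out = sort_by_type_py_alt objects
instance (objects : List (String × String)) (out : List (String × String)) : Decidable (Spec_sort_by_type_py objects out) := by unfold Spec_sort_by_type_py; infer_instance

-- ===== CLAIM (what is proved, stated in full; the proofs are below) =====
def Claim_equal_sort_by_type_py : Prop := ∀ (objects : List (String × String)), Dom_sort_by_type_py objects → Spec_sort_by_type_py objects (sort_by_type_py objects)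

-- ===== LEMMAS AND PROOFS =====

-- abbreviations used only by the proofs
def pvTs (objects : List (String × String)) : List String :=
  PySem.List.dedup (objects.map (fun p => pvPrefix p.1))

def pvGrp (objects : List (String × String)) (t : String) : List (String × String) :=
  objects.filter (fun p => pvPrefix p.1 == t)

def pvKeyB (objects : List (String × String)) (o : String × String) : Lex (Int × Lex (String × String)) :=
  toLex (((pvOrder objects).getD (pvPrefix o.1) 0), toLex o)

lemma pv_sorted2_eq (xs : List (String × String)) :
    PySem.List.sorted2 xs Prod.fst Prod.snd = PySem.List.sorted xs (fun p => toLex p) := by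
  have hcmp : ∀ a b : String × String,
      (decide (a.1 < b.1) || (!decide (b.1 < a.1) && decide (a.2 < b.2)))
        = decide (toLex a < toLex b) := by
    intro a b
    by_cases g1 : a.1 < b.1
    · simp [g1, Prod.Lex.toLex_lt_toLex]
    · by_cases g2 : b.1 < a.1
      · simp only [Prod.Lex.toLex_lt_toLex]
        simp [g1, g2]
        intro he
        exact absurd g2 (by rw [he]; exact lt_irrefl _)
      · have he : a.1 = b.1 := le_antisymm (not_lt.1 g2) (not_lt.1 g1)
        simp [he, Prod.Lex.toLex_lt_toLex]
  unfold PySem.List.sorted2 PySem.List.sorted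
  simp only [hcmp]

lemma pv_lt3_eq (r1 r2 : Int × (String × String)) :
    pvLt3 r1 r2 = decide (toLex (r1.1, toLex r1.2) < toLex (r2.1, toLex r2.2)) := by
  obtain ⟨i1, s1, t1⟩ := r1
  obtain ⟨i2, s2, t2⟩ := r2
  unfold pvLt3
  by_cases h1 : i1 < i2
  · simp [h1, Prod.Lex.toLex_lt_toLex]
  · by_cases h2 : i2 < i1
    · simp [h1, h2, Prod.Lex.toLex_lt_toLex]
      intro he
      exact absurd h2 (by rw [he]; exact lt_irrefl _)
    · have he : i1 = i2 := le_antisymm (not_lt.1 h2) (not_lt.1 h1)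
      subst he
      simp only [h1, decide_false, Bool.false_or, Bool.not_false, Bool.true_and]
      by_cases g1 : s1 < s2
      · simp [g1, Prod.Lex.toLex_lt_toLex]
      · by_cases g2 : s2 < s1
        · simp [g1, g2, Prod.Lex.toLex_lt_toLex]
          intro ge
          exact absurd g2 (by rw [ge]; exact lt_irrefl _)
        · have ge : s1 = s2 := le_antisymm (not_lt.1 g2) (not_lt.1 g1)
          subst ge
          simp [Prod.Lex.toLex_lt_toLex]

lemma pv_alt_eq_sorted (objects : List (String × String)) :
    sort_by_type_py_alt objects = PySem.List.sorted objects (pvKeyB objects) := by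
  have hcmp : ∀ a b : String × String,
      pvLt3 ((pvOrder objects).getD (pvPrefix a.1) 0, a)
            ((pvOrder objects).getD (pvPrefix b.1) 0, b)
        = decide (pvKeyB objects a < pvKeyB objects b) := by
    intro a b
    simpa [pvKeyB] using pv_lt3_eq ((pvOrder objects).getD (pvPrefix a.1) 0, a)
      ((pvOrder objects).getD (pvPrefix b.1) 0, b)
  unfold sort_by_type_py_alt PySem.List.sorted
  simp only [hcmp]
  rfl

lemma pv_ofList_append_singleton (xs : List String) (t : String) :
    PySem.Set.ofList (xs ++ [t]) = (PySem.Set.ofList xs).add t := by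
  simp [PySem.Set.ofList, PySem.Set.add, List.foldl_append]

lemma pv_contains_iff {ν : Type} (d : PySem.Dict String ν) (k : String) :
    d.contains k = true ↔ k ∈ d.keys := by
  show d.items.any (fun p => p.1 == k) = true ↔ k ∈ d.items.map (·.1)
  rw [List.any_eq_true]
  constructor
  · rintro ⟨p, hp, he⟩
    exact List.mem_map.2 ⟨p, hp, eq_of_beq he⟩
  · intro hk
    obtain ⟨p, hp, he⟩ := List.mem_map.1 hk
    exact ⟨p, hp, beq_iff_eq.2 he⟩

-- the order dict is the dedup'd prefix list enumerated
lemma pv_order_items (ks : List String) :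
    (ks.foldl (fun d t => if d.contains t then d else d.insert t (d.size : Int)) PySem.Dict.empty).items
      = (PySem.List.dedup ks).zipIdx.map (fun q => (q.1, (q.2 : Int))) := by
  induction ks using List.reverseRecOn with
  | nil => rfl
  | append_singleton ks t ih =>
    rw [List.foldl_append, List.foldl_cons, List.foldl_nil]
    have hkeys : (ks.foldl (fun d t => if d.contains t then d else d.insert t (d.size : Int))
        PySem.Dict.empty).keys = PySem.List.dedup ks := by
      show (ks.foldl (fun d t => if d.contains t then d else d.insert t (d.size : Int))
        PySem.Dict.empty).items.map (·.1) = PySem.List.dedup ks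
      rw [ih, List.map_map]
      simp [Function.comp_def]
    by_cases hmem : t ∈ ks
    · have hc : (ks.foldl (fun d t => if d.contains t then d else d.insert t (d.size : Int))
          PySem.Dict.empty).contains t = true := by
        rw [pv_contains_iff, hkeys]
        simpa [PySem.List.mem_dedup] using hmem
      have hded : PySem.List.dedup (ks ++ [t]) = PySem.List.dedup ks := by
        simp only [PySem.List.dedup_eq_ofList]
        rw [pv_ofList_append_singleton, PySem.Set.add_of_mem]
        exact (PySem.Set.mem_ofList ks t).2 hmem
      rw [hc, if_pos rfl, hded, ih]
    · have hc : (ks.foldl (fun d t => if d.contains t then d else d.insert t (d.size : Int))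
          PySem.Dict.empty).contains t = false := by
        rw [Bool.eq_false_iff]
        intro hcon
        exact hmem (by simpa [hkeys, PySem.List.mem_dedup] using (pv_contains_iff _ t).1 hcon)
      have hded : PySem.List.dedup (ks ++ [t]) = PySem.List.dedup ks ++ [t] := by
        simp only [PySem.List.dedup_eq_ofList]
        rw [pv_ofList_append_singleton, PySem.Set.add_of_not_mem]
        intro hcon
        exact hmem ((PySem.Set.mem_ofList ks t).1 hcon)
      rw [hc]
      simp only [Bool.false_eq_true, if_false]
      rw [PySem.Dict.items_insert_of_not_contains _ _ hc, ih, hded]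
      rw [List.zipIdx_append, List.map_append]
      congr 1
      show [(t, ((ks.foldl (fun d t => if d.contains t then d else d.insert t (d.size : Int))
          PySem.Dict.empty).items.length : Int))] = _
      rw [ih]
      simp [List.zipIdx]

lemma pv_order_eq (objects : List (String × String)) :
    (pvOrder objects).items = (pvTs objects).zipIdx.map (fun q => (q.1, (q.2 : Int))) := by
  have h : (pvOrder objects).items
      = ((objects.map (fun p => pvPrefix p.1)).foldl
          (fun d t => if d.contains t then d else d.insert t (d.size : Int))
          PySem.Dict.empty).items := by
    rw [List.foldl_map]
    rfl
  rw [h, pv_order_items]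
  rfl

lemma pv_rank (objects : List (String × String)) (i : Nat) (hi : i < (pvTs objects).length) :
    (pvOrder objects).getD ((pvTs objects)[i]) 0 = (i : Int) := by
  have hkeys : (pvOrder objects).keys = pvTs objects := by
    show (pvOrder objects).items.map (·.1) = pvTs objects
    rw [pv_order_eq, List.map_map]
    simp [Function.comp_def]
  have hnd : (pvOrder objects).keys.Nodup := by
    rw [hkeys]
    exact PySem.List.nodup_dedup _
  apply PySem.Dict.getD_of_mem_items _ _ hnd
  rw [pv_order_eq]
  refine List.mem_map.2 ⟨((pvTs objects)[i], i), ?_, rfl⟩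
  have : ((pvTs objects).zipIdx)[i]'(by simpa using hi) = ((pvTs objects)[i], i) := by
    simp
  rw [← this]
  exact List.getElem_mem _

-- A's dict: keys and groups
lemma pv_typeDict_keys (objects : List (String × String)) :
    (pvTypeDict objects).keys = pvTs objects := by
  have h := PySem.Dict.keys_foldl_modify_key (l := objects) (key := fun p => pvPrefix p.1)
    (d0 := ([] : List (String × String))) (f := fun _ x => fun l => l ++ [x])
    (d := PySem.Dict.empty)
  rw [PySem.Dict.keys_empty] at h
  have h2 : PySem.Set.update ([] : PySem.Set String) (objects.map fun p => pvPrefix p.1)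
      = pvTs objects := by
    unfold pvTs
    simp only [PySem.List.dedup_eq_ofList]
    rfl
  exact h.trans h2

lemma pv_typeDict_getD (objects : List (String × String)) (c : String) :
    (pvTypeDict objects).getD c [] = pvGrp objects c := by
  have h := PySem.Dict.getD_foldl_modify_append
    (l := objects.map (fun p => (pvPrefix p.1, p)))
    (d := (PySem.Dict.empty : PySem.Dict String (List (String × String)))) (c := c)
  rw [List.foldl_map] at h
  rw [List.filter_map, List.map_map] at h
  have h2 : (PySem.Dict.empty : PySem.Dict String (List (String × String))).getD c [] = [] := by
    simp [PySem.Dict.getD_empty]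
  rw [h2, List.nil_append] at h
  refine h.trans ?_
  unfold pvGrp
  simp [Function.comp_def]

lemma pv_A_eq_flatMap (objects : List (String × String)) :
    sort_by_type_py objects
      = (pvTs objects).flatMap (fun t => PySem.List.sorted (pvGrp objects t) (fun p => toLex p)) := by
  unfold sort_by_type_py
  rw [PySem.List.foldl_append_eq_flatMap, pv_typeDict_keys, List.nil_append]
  simp only [pv_typeDict_getD, pv_sorted2_eq]

lemma pv_partition_perm (tsl : List String) (xs : List (String × String))
    (hnd : tsl.Nodup) (hcov : ∀ p ∈ xs, pvPrefix p.1 ∈ tsl) :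
    (tsl.flatMap (fun t => xs.filter (fun p => pvPrefix p.1 == t))).Perm xs := by
  induction tsl generalizing xs with
  | nil =>
    have : xs = [] := by
      cases xs with
      | nil => rfl
      | cons a l => exact absurd (hcov a (by simp)) (by simp)
    simp [this]
  | cons t ts ih =>
    simp only [List.flatMap_cons]
    have hne : ∀ t' ∈ ts, t' ≠ t := by
      intro t' ht' he
      exact (List.nodup_cons.1 hnd).1 (he ▸ ht')
    have hrest : ∀ t' ∈ ts, xs.filter (fun p => pvPrefix p.1 == t')
        = (xs.filter (fun p => !(pvPrefix p.1 == t))).filter (fun p => pvPrefix p.1 == t') := by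
      intro t' ht'
      rw [List.filter_filter]
      apply List.filter_congr
      intro a _
      by_cases h3 : pvPrefix a.1 = t'
      · simp [h3, hne t' ht']
      · simp [h3]
    have hflat : ts.flatMap (fun t' => xs.filter (fun p => pvPrefix p.1 == t'))
        = ts.flatMap (fun t' =>
            (xs.filter (fun p => !(pvPrefix p.1 == t))).filter (fun p => pvPrefix p.1 == t')) := by
      rw [List.flatMap_def, List.flatMap_def]
      congr 1
      exact List.map_congr_left hrest
    rw [hflat]
    have hihm := ih (xs.filter (fun p => !(pvPrefix p.1 == t))) (List.nodup_cons.1 hnd).2 ?_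
    · exact (List.Perm.append_left _ hihm).trans (List.filter_append_perm _ xs)
    · intro p hp
      have hp1 := List.mem_filter.1 hp
      have := hcov p hp1.1
      simp only [List.mem_cons] at this
      rcases this with h | h
      · exfalso
        simp [h] at hp1
      · exact h

lemma pv_A_pairwise (objects : List (String × String)) :
    (sort_by_type_py objects).Pairwise (fun a b => pvKeyB objects a ≤ pvKeyB objects b) := by
  rw [pv_A_eq_flatMap, List.flatMap_def, List.pairwise_flatten]
  constructor
  · intro l hl
    obtain ⟨t, ht, rfl⟩ := List.mem_map.1 hl
    obtain ⟨i, hi, rfl⟩ := List.mem_iff_getElem.1 ht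
    refine List.Pairwise.imp_of_mem ?_
      (PySem.List.sorted_pairwise (pvGrp objects ((pvTs objects)[i])) (fun p => toLex p))
    intro a b ha hb hab
    have hpa : pvPrefix a.1 = (pvTs objects)[i] := by
      have := (List.mem_filter.1 ((PySem.List.mem_sorted _ _ _ a).1 ha)).2
      simpa using this
    have hpb : pvPrefix b.1 = (pvTs objects)[i] := by
      have := (List.mem_filter.1 ((PySem.List.mem_sorted _ _ _ b).1 hb)).2
      simpa using this
    unfold pvKeyB
    rw [Prod.Lex.toLex_le_toLex]
    right
    exact ⟨by rw [hpa, hpb], hab⟩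
  · rw [List.pairwise_map, List.pairwise_iff_getElem]
    intro i j hi hj hij x hx y hy
    have hpx : pvPrefix x.1 = (pvTs objects)[i] := by
      have := (List.mem_filter.1 ((PySem.List.mem_sorted _ _ _ x).1 hx)).2
      simpa using this
    have hpy : pvPrefix y.1 = (pvTs objects)[j] := by
      have := (List.mem_filter.1 ((PySem.List.mem_sorted _ _ _ y).1 hy)).2
      simpa using this
    unfold pvKeyB
    rw [Prod.Lex.toLex_le_toLex]
    left
    rw [hpx, hpy, pv_rank objects i hi, pv_rank objects j hj]
    simpa using hij

lemma pv_keyB_injective (objects : List (String × String)) :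
    Function.Injective (pvKeyB objects) := by
  intro a b h
  unfold pvKeyB at h
  have h2 := toLex_inj.1 h
  exact toLex_inj.1 (congrArg Prod.snd h2)

-- ===== VERDICT (by name: the statement is the Claim_ definition above) =====
theorem sort_by_type_py_spec : Claim_equal_sort_by_type_py := by
  intro objects _
  unfold Spec_sort_by_type_py
  have hB : sort_by_type_py_alt objects = PySem.List.sorted objects (pvKeyB objects) :=
    pv_alt_eq_sorted objects
  have hflatperm : ∀ (l : List String)
      (f g : String → List (String × String)), (∀ t ∈ l, (f t).Perm (g t)) →
      (l.flatMap f).Perm (l.flatMap g) := by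
    intro l
    induction l with
    | nil => intro f g _; simp
    | cons t ts ih =>
      intro f g h
      simp only [List.flatMap_cons]
      exact (h t (by simp)).append (ih f g (fun t' ht' => h t' (by simp [ht'])))
  have hpermA : (sort_by_type_py objects).Perm objects := by
    rw [pv_A_eq_flatMap]
    refine List.Perm.trans ?_ (pv_partition_perm (pvTs objects) objects
      (PySem.List.nodup_dedup _) ?_)
    · exact hflatperm _ _ _ (fun t _ => PySem.List.sorted_perm (pvGrp objects t) _ false)
    · intro p hp
      exact (PySem.List.mem_dedup _ _).2 (List.mem_map.2 ⟨p, hp, rfl⟩)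
  refine PySem.List.eq_of_perm_of_pairwise_le_of_injective (pvKeyB objects)
    (pv_keyB_injective objects) ?_ (pv_A_pairwise objects) ?_
  · rw [hB]
    exact hpermA.trans (PySem.List.sorted_perm objects (pvKeyB objects) false).symm
  · rw [hB]
    exact PySem.List.sorted_pairwise objects (pvKeyB objects)
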